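-- pv_equiv track=rewrite | github.com/heltonmaia/proj-question-generator | question_generator/questions_ch5_bk/question_ch5_0028.py | analisar_lista_numeros
-- ===== SOURCE A (Python) =====
-- def analisar_lista_numeros(lista: list[int]) -> tuple[int, int, int, int, int]:
--     """
--     Analisa uma lista de números inteiros e retorna a soma,
--     a contagem de pares, ímpares, positivos e negativos.
--
--     Args:
--         lista (list[int]): Uma lista de números inteiros.
--
--     Returns:
--         tuple[int, int, int, int, int]: Uma tupla contendo:
--             - A soma total dos números.
--             - A contagem de números pares.
--             - A contagem de números ímpares.
--             - A contagem de números positivos (ignorando o zero).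
--             - A contagem de números negativos.
--     """
--     soma_total = 0
--     contagem_pares = 0
--     contagem_impares = 0
--     contagem_positivos = 0
--     contagem_negativos = 0
--
--     for num in lista:
--         soma_total += num
--
--         if num % 2 == 0:
--             contagem_pares += 1
--         else:
--             contagem_impares += 1
--
--         if num > 0:
--             contagem_positivos += 1
--         elif num < 0:
--             contagem_negativos += 1
--
--     return soma_total, contagem_pares, contagem_impares, contagem_positivos, contagem_negativos
-- ===== SOURCE B (Python) =====
-- def analisar_lista_numeros(lista: list[int]) -> tuple[int, int, int, int, int]:
--     soma_total = sum(lista)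
--     contagem_pares = sum(1 for n in lista if n % 2 == 0)
--     contagem_impares = sum(1 for n in lista if n % 2 != 0)
--     contagem_positivos = sum(1 for n in lista if n > 0)
--     contagem_negativos = sum(1 for n in lista if n < 0)
--     return soma_total, contagem_pares, contagem_impares, contagem_positivos, contagem_negativos
-- ===== Notes on version B (the rewrite author's own statement) =====
-- stated objective: idiomatic
-- what changed: Replaces the single fused accumulating loop over five counters with independent library-level passes: sum(lista) plus four generator-expression counts, one per statistic.
import Mathlib
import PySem

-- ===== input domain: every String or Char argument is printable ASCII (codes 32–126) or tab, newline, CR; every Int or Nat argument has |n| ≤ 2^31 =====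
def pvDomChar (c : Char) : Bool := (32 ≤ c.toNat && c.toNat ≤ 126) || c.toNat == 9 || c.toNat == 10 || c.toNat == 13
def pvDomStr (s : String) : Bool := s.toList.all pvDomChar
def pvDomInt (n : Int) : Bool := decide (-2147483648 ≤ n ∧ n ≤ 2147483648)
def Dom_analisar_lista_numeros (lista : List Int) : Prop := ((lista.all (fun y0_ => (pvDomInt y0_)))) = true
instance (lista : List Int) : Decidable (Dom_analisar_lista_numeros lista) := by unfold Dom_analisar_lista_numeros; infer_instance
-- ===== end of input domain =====

-- B replaces A's single fused accumulating loop with five independent passes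
-- (a sum and four counts); same results, idiomatic decomposition.

-- ===== PORT A =====
-- literal port of A's single loop carrying the five accumulators
def analisar_lista_numeros (lista : List Int) : Int × Int × Int × Int × Int :=
  lista.foldl
    (fun (s : Int × Int × Int × Int × Int) num =>
      let soma := s.1 + num
      let pares := if PySem.Int.mod num 2 == 0 then s.2.1 + 1 else s.2.1
      let impares := if PySem.Int.mod num 2 == 0 then s.2.2.1 else s.2.2.1 + 1
      let pos := if num > 0 then s.2.2.2.1 + 1 else s.2.2.2.1
      let neg := if num > 0 then s.2.2.2.2 else if num < 0 then s.2.2.2.2 + 1 else s.2.2.2.2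
      (soma, pares, impares, pos, neg))
    (0, 0, 0, 0, 0)

-- ===== PORT B =====
-- port of B: sum(lista) and four independent counts
def analisar_lista_numeros_alt (lista : List Int) : Int × Int × Int × Int × Int :=
  (lista.sum,
   (lista.countP (fun n => PySem.Int.mod n 2 == 0) : Int),
   (lista.countP (fun n => PySem.Int.mod n 2 != 0) : Int),
   (lista.countP (fun n => n > 0) : Int),
   (lista.countP (fun n => n < 0) : Int))

-- ===== PRECONDITION & SPEC =====
def Spec_analisar_lista_numeros (lista : List Int) (out : Int × Int × Int × Int × Int) : Prop := out = analisar_lista_numeros_alt lista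
instance (lista : List Int) (out : Int × Int × Int × Int × Int) : Decidable (Spec_analisar_lista_numeros lista out) := by unfold Spec_analisar_lista_numeros; infer_instance

-- ===== CLAIM (what is proved, stated in full; the proofs are below) =====
def Claim_equal_analisar_lista_numeros : Prop := ∀ (lista : List Int), Dom_analisar_lista_numeros lista → Spec_analisar_lista_numeros lista (analisar_lista_numeros lista)

-- ===== LEMMAS AND PROOFS =====

theorem analisar_fold_general (lista : List Int) (a b c d e : Int) :
    lista.foldl
      (fun (s : Int × Int × Int × Int × Int) num =>
        let soma := s.1 + num
        let pares := if PySem.Int.mod num 2 == 0 then s.2.1 + 1 else s.2.1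
        let impares := if PySem.Int.mod num 2 == 0 then s.2.2.1 else s.2.2.1 + 1
        let pos := if num > 0 then s.2.2.2.1 + 1 else s.2.2.2.1
        let neg := if num > 0 then s.2.2.2.2 else if num < 0 then s.2.2.2.2 + 1 else s.2.2.2.2
        (soma, pares, impares, pos, neg))
      (a, b, c, d, e)
    = (a + lista.sum,
       b + (lista.countP (fun n => PySem.Int.mod n 2 == 0) : Int),
       c + (lista.countP (fun n => PySem.Int.mod n 2 != 0) : Int),
       d + (lista.countP (fun n => n > 0) : Int),
       e + (lista.countP (fun n => n < 0) : Int)) := by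
  induction lista generalizing a b c d e with
  | nil => simp
  | cons x xs ih =>
    simp only [List.foldl_cons, List.sum_cons, List.countP_cons, ih]
    rcases lt_trichotomy x 0 with hx | hx | hx
    · have hp : ¬ (0:Int) < x := by omega
      simp [hx, hp, bne] <;> omega
    · subst hx
      simp [bne] <;> omega
    · have hn : ¬ x < (0:Int) := by omega
      simp [hx, hn, bne] <;> omega

theorem analisar_lista_numeros_spec : Claim_equal_analisar_lista_numeros := by
  intro lista _
  show analisar_lista_numeros lista = analisar_lista_numeros_alt lista
  rw [analisar_lista_numeros, analisar_fold_general]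
  simp [analisar_lista_numeros_alt]
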